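-- pv_equiv track=rewrite | github.com/osezy/leetcode_sloutions | winning card.py | solution
-- ===== SOURCE A (Python) =====
-- def solution(cards) -> int:
--     new = []
--     res = -1
--     for sub_card in cards:
--         for card in sub_card:
--             if card in new:
--                 new.remove(card)
--             else:
--                 new.append(card)
--     if len(new) == 0:
--         return res
--     highest = 0
--     for i in new:
--         if i > highest:
--             highest = i
--     return highest
-- ===== SOURCE B (Python) =====
-- def solution(cards) -> int:
--     # Sort all values descending, then scan runs of equal values: the first
--     # run with odd length is the largest value occurring an odd number of times.
--     flat = sorted((card for sub_card in cards for card in sub_card), reverse=True)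
--     n = len(flat)
--     i = 0
--     while i < n:
--         j = i
--         while j < n and flat[j] == flat[i]:
--             j += 1
--         if (j - i) % 2 == 1:
--             return max(0, flat[i])
--         i = j
--     return -1
-- ===== Notes on version B (the rewrite author's own statement) =====
-- stated objective: alternative
-- what changed: Replaces A's quadratic toggle-a-live-odd-list (linear membership test and remove per element, then a max pass) with sort-all-values-descending followed by a run-length scan that returns at the first run of odd length (the largest odd-count value, clamped with max(0,...)) or -1 if no run is odd.
import Mathlib
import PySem

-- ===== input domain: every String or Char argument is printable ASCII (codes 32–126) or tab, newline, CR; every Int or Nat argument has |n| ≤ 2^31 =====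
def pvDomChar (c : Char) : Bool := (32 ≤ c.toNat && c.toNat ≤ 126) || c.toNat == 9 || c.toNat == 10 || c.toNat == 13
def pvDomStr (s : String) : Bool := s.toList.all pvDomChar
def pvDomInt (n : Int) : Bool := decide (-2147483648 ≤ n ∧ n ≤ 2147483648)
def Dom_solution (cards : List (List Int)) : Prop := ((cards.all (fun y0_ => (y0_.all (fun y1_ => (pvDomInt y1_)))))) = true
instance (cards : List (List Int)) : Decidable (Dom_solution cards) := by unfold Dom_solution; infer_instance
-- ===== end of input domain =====

-- B replaces A's toggle-a-live-odd-list with sort-descending + run-length scan: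
-- the first run of odd length in the sorted list is the answer (objective: alternative algorithm).

-- ===== PORT A =====
def solution (cards : List (List Int)) : Int :=
  let new := cards.foldl
    (fun acc sub_card => sub_card.foldl
      (fun n card => if n.contains card then n.erase card else n ++ [card]) acc) ([] : List Int)
  if new.length = 0 then -1
  else new.foldl (fun highest i => if i > highest then i else highest) 0

-- ===== PORT B =====
-- the index while-loop of Source B ported as run recursion: the inner 'while flat[j] == flat[i]'
-- is takeWhile, advancing 'i = j' is dropWhile (exact: runs of the head stop at the first differing element)
def runScan : List Int → Int
  | [] => -1
  | x :: rest =>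
    if ((x :: rest).takeWhile (fun c => c == x)).length % 2 = 1 then max 0 x
    else runScan ((x :: rest).dropWhile (fun c => c == x))
termination_by l => l.length
decreasing_by
  simp only [List.dropWhile_cons, beq_self_eq_true, if_pos]
  exact Nat.lt_succ_of_le (List.length_dropWhile_le _ _)

def solution_alt (cards : List (List Int)) : Int :=
  runScan (PySem.List.sorted cards.flatten (fun y => y) true)

-- ===== PRECONDITION & SPEC =====
def Spec_solution (cards : List (List Int)) (out : Int) : Prop := out = solution_alt cards
instance (cards : List (List Int)) (out : Int) : Decidable (Spec_solution cards out) := by unfold Spec_solution; infer_instance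

-- ===== CLAIM (what is proved, stated in full; the proofs are below) =====
def Claim_equal_solution : Prop := ∀ (cards : List (List Int)), Dom_solution cards → Spec_solution cards (solution cards)

-- ===== LEMMAS AND PROOFS =====

-- A's toggle step
def pvStep (n : List Int) (card : Int) : List Int :=
  if n.contains card then n.erase card else n ++ [card]

-- toggle-loop invariant: the live list stays duplicate-free and holds exactly the
-- elements whose membership in the start state disagrees with the parity of their count
theorem pvToggle_inv (xs : List Int) : ∀ (acc : List Int), acc.Nodup →
    (xs.foldl pvStep acc).Nodup ∧
    ∀ y, y ∈ xs.foldl pvStep acc ↔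
      ((y ∈ acc ∧ xs.count y % 2 = 0) ∨ (y ∉ acc ∧ xs.count y % 2 = 1)) := by
  induction xs with
  | nil => intro acc h; simpa using h
  | cons x xs ih =>
    intro acc h
    have hstep : (pvStep acc x).Nodup := by
      unfold pvStep
      by_cases hx : acc.contains x
      · simp only [hx, if_pos]; exact h.erase x
      · simp only [hx, if_neg, Bool.false_eq_true, not_false_iff]
        simp only [List.contains_eq_mem, decide_eq_true_eq] at hx
        rw [List.nodup_append]
        exact ⟨h, List.nodup_singleton x, fun a ha => by simp; exact fun he => hx (he ▸ ha)⟩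
    obtain ⟨hn, hm⟩ := ih (pvStep acc x) hstep
    refine ⟨by simpa using hn, ?_⟩
    intro y
    have hmem : y ∈ pvStep acc x ↔ ((y ∈ acc ∧ y ≠ x) ∨ (y ∉ acc ∧ y = x)) := by
      unfold pvStep
      by_cases hx : x ∈ acc
      · simp only [List.contains_eq_mem, hx, decide_true, if_pos]
        rw [h.mem_erase_iff]
        constructor
        · rintro ⟨hne, hy⟩; exact Or.inl ⟨hy, hne⟩
        · rintro (⟨hy, hne⟩ | ⟨hy, rfl⟩)
          · exact ⟨hne, hy⟩
          · exact absurd hx hy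
      · simp only [List.contains_eq_mem, hx, decide_false, Bool.false_eq_true, if_neg,
          not_false_iff, List.mem_append, List.mem_singleton]
        by_cases hyx : y = x
        · subst hyx; simp [hx]
        · simp only [hyx, or_false, ne_eq, not_false_iff, and_true, and_false]
    rw [List.foldl_cons, hm y, hmem]
    by_cases hyx : y = x
    · subst hyx
      have hc : (y :: xs).count y = xs.count y + 1 := by simp
      rw [hc]
      by_cases hya : y ∈ acc <;> simp [hya] <;> omega
    · have hc : (x :: xs).count y = xs.count y := by
        simp [List.count_cons]; omega
      rw [hc]
      by_cases hya : y ∈ acc <;> simp [hyx, hya]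

theorem pvLe_foldl_max (l : List Int) : ∀ a : Int, a ≤ l.foldl max a := by
  induction l with
  | nil => intro a; simp
  | cons x t ih => intro a; exact le_trans (le_max_left a x) (ih (max a x))

theorem pvMem_le_foldl_max (l : List Int) : ∀ (a y : Int), y ∈ l → y ≤ l.foldl max a := by
  induction l with
  | nil => intro a y h; simp at h
  | cons x t ih =>
    intro a y h
    rcases List.mem_cons.mp h with rfl | h
    · exact le_trans (le_max_right a y) (pvLe_foldl_max t _)
    · exact ih _ y h

theorem pvFoldl_max_le (l : List Int) : ∀ (a b : Int), a ≤ b → (∀ y ∈ l, y ≤ b) →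
    l.foldl max a ≤ b := by
  induction l with
  | nil => intro a b h _; simpa using h
  | cons x t ih =>
    intro a b h hl
    exact ih _ b (max_le h (hl x (List.mem_cons_self))) (fun y hy => hl y (List.mem_cons_of_mem _ hy))

-- helper: on a descending-sorted cons list, the count of the head is the run length,
-- the head does not survive the drop, and other values keep their counts
theorem pvRun_facts (x : Int) (rest : List Int)
    (hl : (x :: rest).Pairwise (fun a b => b ≤ a)) :
    (x :: rest).count x = ((x :: rest).takeWhile (fun c => c == x)).length ∧
    ((x :: rest).dropWhile (fun c => c == x)).count x = 0 ∧
    (∀ y, y ≠ x → ((x :: rest).dropWhile (fun c => c == x)).count y = (x :: rest).count y) := by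
  have hbound : ∀ y ∈ (x :: rest), y ≤ x := by
    intro y hy
    rcases List.mem_cons.mp hy with rfl | hy
    · exact le_refl y
    · exact (List.pairwise_cons.mp hl).1 y hy
  have hsub : ((x :: rest).dropWhile (fun c => c == x)).Sublist (x :: rest) :=
    List.dropWhile_sublist _
  have h2 : ((x :: rest).dropWhile (fun c => c == x)).count x = 0 := by
    apply List.count_eq_zero.mpr
    intro hx
    cases hdw : (x :: rest).dropWhile (fun c => c == x) with
    | nil => rw [hdw] at hx; simp at hx
    | cons t0 tl =>
      have ht0 : ¬ (t0 == x) = true := by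
        have := List.head_dropWhile_not (p := fun c => c == x) (l := x :: rest)
          (by simp [hdw])
        simpa [hdw] using this
      have ht0x : t0 ≠ x := by simpa using ht0
      have hpw : (t0 :: tl).Pairwise (fun a b => b ≤ a) := by
        rw [← hdw]; exact hl.sublist hsub
      rw [hdw] at hx
      rcases List.mem_cons.mp hx with rfl | hx
      · exact ht0x rfl
      · have hle : x ≤ t0 := (List.pairwise_cons.mp hpw).1 x hx
        have ht0mem : t0 ∈ (x :: rest) := hsub.mem (by simp [hdw])
        exact ht0x (le_antisymm (hbound t0 ht0mem) hle)
  refine ⟨?_, h2, ?_⟩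
  · conv_lhs => rw [← List.takeWhile_append_dropWhile (p := fun c => c == x) (l := x :: rest),
      List.count_append]
    have h1 : ((x :: rest).takeWhile (fun c => c == x)).count x
        = ((x :: rest).takeWhile (fun c => c == x)).length := by
      apply List.count_eq_length.mpr
      intro b hb
      have hbx : b = x := by simpa using List.mem_takeWhile_imp hb
      omega
    omega
  · intro y hyx
    conv_rhs => rw [← List.takeWhile_append_dropWhile (p := fun c => c == x) (l := x :: rest)]
    rw [List.count_append]
    have h0 : ((x :: rest).takeWhile (fun c => c == x)).count y = 0 := by
      apply List.count_eq_zero.mpr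
      intro hy
      have := List.mem_takeWhile_imp hy
      exact hyx (by simpa using this)
    omega

-- the run scan over a descending-sorted list returns -1 if no value has odd count,
-- else the max-fold over any list `new` whose membership is exactly "odd count in l"
theorem pvRunScan_eq (l : List Int) :
    l.Pairwise (fun a b => b ≤ a) →
    ∀ (new : List Int), (∀ y, y ∈ new ↔ l.count y % 2 = 1) →
    runScan l = (if new.length = 0 then -1 else new.foldl max 0) := by
  induction l using runScan.induct with
  | case1 =>
    intro _ new hmem
    have : new = [] := by
      apply List.eq_nil_iff_forall_not_mem.mpr
      intro y hy
      have := (hmem y).mp hy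
      simp at this
    simp [this, runScan]
  | case2 x rest hodd =>
    intro hl new hmem
    obtain ⟨hrun, -, -⟩ := pvRun_facts x rest hl
    have hbound : ∀ y ∈ (x :: rest), y ≤ x := by
      intro y hy
      rcases List.mem_cons.mp hy with rfl | hy
      · exact le_refl y
      · exact (List.pairwise_cons.mp hl).1 y hy
    rw [runScan, if_pos hodd]
    have hxnew : x ∈ new := (hmem x).mpr (by omega)
    have hne : new.length ≠ 0 := by
      intro h0
      rw [List.length_eq_zero_iff] at h0
      rw [h0] at hxnew; simp at hxnew
    rw [if_neg hne]
    have hub : ∀ y ∈ new, y ≤ x := by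
      intro y hy
      have hodd' := (hmem y).mp hy
      have : y ∈ (x :: rest) := by
        rw [← List.count_pos_iff]; omega
      exact hbound y this
    apply le_antisymm
    · exact max_le (pvLe_foldl_max new 0) (pvMem_le_foldl_max new 0 x hxnew)
    · exact pvFoldl_max_le new 0 (max 0 x) (le_max_left 0 x)
        (fun y hy => le_trans (hub y hy) (le_max_right 0 x))
  | case3 x rest heven ih =>
    intro hl new hmem
    obtain ⟨hrun, hdrop0, hdrop⟩ := pvRun_facts x rest hl
    have hsub : ((x :: rest).dropWhile (fun c => c == x)).Sublist (x :: rest) :=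
      List.dropWhile_sublist _
    rw [runScan, if_neg heven]
    apply ih (hl.sublist hsub) new
    intro y
    rw [hmem y]
    by_cases hyx : y = x
    · subst hyx
      rw [hdrop0, hrun]
      constructor <;> intro h <;> [omega; omega]
    · rw [hdrop y hyx]

-- fold step of A's max loop is max
theorem pvFold_if_eq_max :
    (fun (highest i : Int) => if i > highest then i else highest) = (max : Int → Int → Int) := by
  funext h i
  simp only [max_def]
  split_ifs <;> omega

-- ===== VERDICT (by name: the statement is the Claim_ definition above) =====
theorem solution_spec : Claim_equal_solution := by
  intro cards _
  unfold Spec_solution solution solution_alt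
  simp only []
  set xs := cards.flatten with hxs
  have hA : cards.foldl (fun acc sub_card => sub_card.foldl
      (fun n card => if n.contains card then n.erase card else n ++ [card]) acc) ([] : List Int)
      = xs.foldl pvStep [] := by
    rw [hxs, List.foldl_flatten]; rfl
  rw [hA]
  obtain ⟨hnodupA, hmemA⟩ := pvToggle_inv xs [] List.nodup_nil
  set new := xs.foldl pvStep [] with hnew
  have hmem : ∀ y, y ∈ new ↔ (PySem.List.sorted xs (fun y => y) true).count y % 2 = 1 := by
    intro y
    rw [(PySem.List.sorted_perm xs (fun y => y) true).count_eq]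
    rw [hmemA y]; simp
  rw [pvRunScan_eq _ (PySem.List.sorted_pairwise_rev xs (fun y => y)) new hmem,
    pvFold_if_eq_max]
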